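-- pv_equiv track=rewrite | github.com/nasodev/keyflow | tools/midi_to_kfchart/pipeline/pitch_clamp.py | clamp_pitches
-- ===== SOURCE A (Python) =====
-- PITCH_MIN = 36
--
-- PITCH_MAX = 83
--
-- def clamp_pitches(notes: list[dict]) -> list[dict]:
--     out: list[dict] = []
--     for n in notes:
--         p = n["pitch"]
--         while p < PITCH_MIN:
--             p += 12
--         while p > PITCH_MAX:
--             p -= 12
--         if not (PITCH_MIN <= p <= PITCH_MAX):
--             raise ValueError(f"pitch {n['pitch']} could not be clamped into [{PITCH_MIN},{PITCH_MAX}]")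
--         out.append({**n, "pitch": p})
--     return out
-- ===== SOURCE B (Python) =====
-- PITCH_MIN = 36
--
-- PITCH_MAX = 83
--
-- def _clamp(p: int) -> int:
--     if p < PITCH_MIN:
--         return p + 12 * ((47 - p) // 12)
--     if p > PITCH_MAX:
--         return p - 12 * ((p - 72) // 12)
--     return p
--
-- def clamp_pitches(notes: list[dict]) -> list[dict]:
--     return [{**n, "pitch": _clamp(n["pitch"])} for n in notes]
-- ===== Notes on version B (the rewrite author's own statement) =====
-- stated objective: simpler
-- what changed: B replaces A's two octave-shifting while-loops per note with a single closed-form floor-division shift and builds the result as a list comprehension.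
import Mathlib
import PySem

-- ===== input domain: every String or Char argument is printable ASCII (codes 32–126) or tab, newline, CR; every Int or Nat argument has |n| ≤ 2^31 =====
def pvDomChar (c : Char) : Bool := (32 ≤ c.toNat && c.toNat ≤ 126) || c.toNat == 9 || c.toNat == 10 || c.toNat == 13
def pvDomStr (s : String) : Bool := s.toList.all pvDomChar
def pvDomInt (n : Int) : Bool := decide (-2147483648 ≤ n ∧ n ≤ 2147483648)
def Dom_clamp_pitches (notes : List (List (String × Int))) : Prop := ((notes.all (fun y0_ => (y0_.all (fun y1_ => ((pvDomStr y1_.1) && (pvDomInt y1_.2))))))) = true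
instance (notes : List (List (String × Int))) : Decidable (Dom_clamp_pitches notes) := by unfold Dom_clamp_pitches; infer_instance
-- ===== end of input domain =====

-- B replaces A's two octave-shifting while-loops by a closed-form floor-division shift per note (simpler, one comprehension).


-- ===== PORT A =====
-- while p < PITCH_MIN: p += 12
def pvUpA (p : Int) : Int :=
  if p < 36 then pvUpA (p + 12) else p
termination_by (36 - p).toNat
decreasing_by omega

-- while p > PITCH_MAX: p -= 12
def pvDnA (p : Int) : Int :=
  if p > 83 then pvDnA (p - 12) else p
termination_by (p - 83).toNat
decreasing_by omega

def clamp_pitches (notes : List (List (String × Int))) : List (List (String × Int)) :=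
  notes.foldl (fun out n =>
    let p := (PySem.Dict.mk n).getD "pitch" 0   -- n["pitch"]; KeyError (excluded by Pre_) defaulted
    let p2 := pvDnA (pvUpA p)
    if ¬ (36 ≤ p2 ∧ p2 ≤ 83) then out          -- raise ValueError (unreachable on integers)
    else out ++ [((PySem.Dict.mk n).insert "pitch" p2).items]) []

-- ===== PORT B =====
def pvClampB (p : Int) : Int :=
  if p < 36 then p + 12 * PySem.Int.floordiv (47 - p) 12
  else if p > 83 then p - 12 * PySem.Int.floordiv (p - 72) 12
  else p

def clamp_pitches_alt (notes : List (List (String × Int))) : List (List (String × Int)) :=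
  notes.map (fun n =>
    ((PySem.Dict.mk n).insert "pitch" (pvClampB ((PySem.Dict.mk n).getD "pitch" 0))).items)

-- ===== PRECONDITION & SPEC =====
-- Pre_ excludes notes lacking a "pitch" key, on which the Python A raises KeyError.
def Pre_clamp_pitches (notes : List (List (String × Int))) : Prop :=
  ∀ n ∈ notes, (PySem.Dict.mk n).contains "pitch" = true
instance (notes : List (List (String × Int))) : Decidable (Pre_clamp_pitches notes) := by unfold Pre_clamp_pitches; infer_instance

def pvWitness_clamp_pitches : (List (List (String × Int))) := [[("pitch", 12), ("vel", 90)], [("pitch", 100)]]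

def Spec_clamp_pitches (notes : List (List (String × Int))) (out : List (List (String × Int))) : Prop := out = clamp_pitches_alt notes
instance (notes : List (List (String × Int))) (out : List (List (String × Int))) : Decidable (Spec_clamp_pitches notes out) := by unfold Spec_clamp_pitches; infer_instance

-- ===== CLAIM (what is proved, stated in full; the proofs are below) =====
def Claim_equal_clamp_pitches : Prop := ∀ (notes : List (List (String × Int))), Dom_clamp_pitches notes → Pre_clamp_pitches notes → Spec_clamp_pitches notes (clamp_pitches notes)

-- ===== LEMMAS AND PROOFS =====
lemma pvUpA_eq (p : Int) : pvUpA p = if p < 36 then p + 12 * ((47 - p) / 12) else p := by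
  fun_induction pvUpA p with
  | case1 p h ih => rw [if_pos h, ih]; split_ifs with h2 <;> omega
  | case2 p h => rw [if_neg h]

lemma pvDnA_eq (p : Int) : pvDnA p = if p > 83 then p - 12 * ((p - 72) / 12) else p := by
  fun_induction pvDnA p with
  | case1 p h ih => rw [if_pos h, ih]; split_ifs with h2 <;> omega
  | case2 p h => rw [if_neg h]

lemma pvClamp_eq (p : Int) : pvDnA (pvUpA p) = pvClampB p := by
  unfold pvClampB
  rw [pvUpA_eq p, PySem.Int.floordiv_eq_ediv_of_pos (by norm_num : (0:Int) < 12),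
      PySem.Int.floordiv_eq_ediv_of_pos (by norm_num : (0:Int) < 12)]
  by_cases h1 : p < 36
  · rw [if_pos h1, if_pos h1, pvDnA_eq, if_neg (by omega)]
  · rw [if_neg h1, if_neg h1, pvDnA_eq]

lemma pvClamp_bounds (p : Int) : 36 ≤ pvClampB p ∧ pvClampB p ≤ 83 := by
  unfold pvClampB
  rw [PySem.Int.floordiv_eq_ediv_of_pos (by norm_num : (0:Int) < 12),
      PySem.Int.floordiv_eq_ediv_of_pos (by norm_num : (0:Int) < 12)]
  split_ifs with h1 h2 <;> omega

lemma pvLoop_eq (notes : List (List (String × Int))) (acc : List (List (String × Int))) :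
    notes.foldl (fun out n =>
      let p := (PySem.Dict.mk n).getD "pitch" 0
      let p2 := pvDnA (pvUpA p)
      if ¬ (36 ≤ p2 ∧ p2 ≤ 83) then out
      else out ++ [((PySem.Dict.mk n).insert "pitch" p2).items]) acc
    = acc ++ notes.map (fun n =>
        ((PySem.Dict.mk n).insert "pitch" (pvClampB ((PySem.Dict.mk n).getD "pitch" 0))).items) := by
  induction notes generalizing acc with
  | nil => simp
  | cons n t ih =>
    simp only [List.foldl_cons, List.map_cons]
    rw [pvClamp_eq, if_neg (not_not_intro (pvClamp_bounds _)), ih,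
        List.append_assoc, List.singleton_append]

-- ===== VERDICT (by name: the statement is the Claim_ definition above) =====
theorem clamp_pitches_spec : Claim_equal_clamp_pitches := by
  intro notes _ _
  show clamp_pitches notes = clamp_pitches_alt notes
  unfold clamp_pitches clamp_pitches_alt
  simpa using pvLoop_eq notes []
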